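-- pv_equiv track=rewrite | github.com/manimanis/4T_2021 | codes/chapitre05/nombre_gagnant/nombre_gagnant.py | chance
-- ===== SOURCE A (Python) =====
-- def premier(n):
--     if n <= 1:
--         return False
--     if n <= 3:
--         return True
--     if n % 2 == 0 or n % 3 == 0:
--         return False
--     i = 5
--     mx = int(n ** 0.5 + 1)
--     premier = True
--     while premier and i <= mx:
--         premier = n % i != 0
--         i += 2
--     return premier
--
-- def chance(ch):
--     if not (ch.isdigit() and len(ch) == 8 and ch[0] in ["2", "4", "5", "9"]):
--         msg = "Vérifier le numéro de téléphone"
--     else: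
--         msg = "Désolé, vous n'avez pas gagné."
--         s = 0
--         for i in range(len(ch)):
--             s += int(ch[i]) * i
--         if premier(s):
--             msg = "Félicitations, vous avez gagné."
--     return msg
-- ===== SOURCE B (Python) =====
-- def _sieve(limit):
--     prime = [True] * (limit + 1)
--     prime[0] = False
--     prime[1] = False
--     for p in range(2, limit + 1):
--         if prime[p]:
--             for m in range(p * p, limit + 1, p):
--                 prime[m] = False
--     return prime
--
--
-- # weighted digit sum of a valid 8-digit string is at most 9*(0+1+...+7) = 252
-- _PRIME_TABLE = _sieve(252)
--
--
-- def chance(ch):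
--     if not ch.isdigit() or len(ch) != 8 or ch[0] not in "2459":
--         return "Vérifier le numéro de téléphone"
--     s = sum(int(d) * i for i, d in enumerate(ch))
--     if _PRIME_TABLE[s]:
--         return "Félicitations, vous avez gagné."
--     return "Désolé, vous n'avez pas gagné."
-- ===== Notes on version B (the rewrite author's own statement) =====
-- stated objective: alternative
-- what changed: Trial-division primality test replaced by a Sieve of Eratosthenes table covering the maximal weighted digit sum (252), with early-return validation and the digit sum computed by enumerate/sum instead of an index loop.
import Mathlib
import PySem

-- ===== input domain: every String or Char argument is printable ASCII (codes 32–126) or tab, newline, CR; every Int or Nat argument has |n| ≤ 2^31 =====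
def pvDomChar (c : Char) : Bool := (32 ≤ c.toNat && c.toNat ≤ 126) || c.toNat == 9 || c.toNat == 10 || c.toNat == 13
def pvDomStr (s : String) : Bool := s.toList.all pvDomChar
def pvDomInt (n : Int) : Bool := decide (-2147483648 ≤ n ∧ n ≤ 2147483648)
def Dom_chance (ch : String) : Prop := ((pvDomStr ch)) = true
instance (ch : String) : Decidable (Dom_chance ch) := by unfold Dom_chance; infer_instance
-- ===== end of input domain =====

-- B replaces A's trial-division primality helper by a precomputed Sieve-of-Eratosthenes
-- table covering every reachable weighted digit sum (≤ 252); same return value everywhere.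


-- ===== PORT A =====
-- while premier and i <= mx: premier = n % i != 0; i += 2
-- (fuel only makes the recursion structural; with the fuel passed below the 0-case is unreachable)
def premierLoopA (n mx i : Int) : Nat → Bool
  | 0 => true
  | fuel + 1 =>
    if i ≤ mx then
      if PySem.Int.mod n i ≠ 0 then premierLoopA n mx (i + 2) fuel else false
    else true

-- integer sqrt as a kernel-computable scan: ⌊√n⌋ = (number of k ∈ [0,n] with k*k ≤ n) - 1
def isqrtA (n : Nat) : Nat :=
  ((List.range (n + 1)).filter (fun k => k * k ≤ n)).length - 1

-- 'mx = int(n ** 0.5 + 1)' ported as ⌊√n⌋ + 1: exact for the nonnegative n this branch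
-- receives (double sqrt is correctly rounded, so int(n**0.5+1) = ⌊√n⌋+1 for 0 ≤ n ≤ 2^31)
def premierA (n : Int) : Bool :=
  if n ≤ 1 then false
  else if n ≤ 3 then true
  else if PySem.Int.mod n 2 = 0 ∨ PySem.Int.mod n 3 = 0 then false
  else
    let mx : Int := (isqrtA n.toNat : Int) + 1
    premierLoopA n mx 5 (mx + 1).toNat

-- ch[0] in ["2","4","5","9"] ported as char membership (1-char strings compare as chars);
-- the pyGetD/getD defaults are unreachable under the isdigit/len guards A checks first
def chance (ch : String) : String :=
  if !(PySem.Str.strIsdigit ch && PySem.Str.len ch == 8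
        && decide (PySem.List.pyGetD ch.toList 0 ' ' ∈ ['2', '4', '5', '9'])) then
    "Vérifier le numéro de téléphone"
  else
    let s := (PySem.List.pyRange 0 (PySem.Str.len ch) 1).foldl
      (fun s i => s + (PySem.Int.ofChars? [PySem.List.pyGetD ch.toList i ' ']).getD 0 * i) 0
    if premierA s then "Félicitations, vous avez gagné."
    else "Désolé, vous n'avez pas gagné."

-- ===== PORT B =====
def sieveB (limit : Int) : List Bool :=
  let prime := List.replicate (limit + 1).toNat true
  let prime := PySem.List.pySetD prime 0 false
  let prime := PySem.List.pySetD prime 1 false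
  (PySem.List.pyRange 2 (limit + 1) 1).foldl
    (fun prime p =>
      if PySem.List.pyGetD prime p false then
        (PySem.List.pyRange (p * p) (limit + 1) p).foldl
          (fun prime m => PySem.List.pySetD prime m false) prime
      else prime)
    prime

-- weighted digit sum of a valid 8-digit string is at most 9*(0+1+...+7) = 252
def primeTableB : List Bool := sieveB 252

-- ch[0] not in "2459" ported as char membership; defaults unreachable under the guards
def chance_alt (ch : String) : String :=
  if !PySem.Str.strIsdigit ch || PySem.Str.len ch != 8
      || !decide (PySem.List.pyGetD ch.toList 0 ' ' ∈ ['2', '4', '5', '9']) then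
    "Vérifier le numéro de téléphone"
  else
    let s := ((PySem.List.enumerate ch.toList).map
      (fun p => (PySem.Int.ofChars? [p.2]).getD 0 * p.1)).sum
    if PySem.List.pyGetD primeTableB s false then "Félicitations, vous avez gagné."
    else "Désolé, vous n'avez pas gagné."

-- ===== PRECONDITION & SPEC =====
def Spec_chance (ch : String) (out : String) : Prop := out = chance_alt ch
instance (ch : String) (out : String) : Decidable (Spec_chance ch out) := by unfold Spec_chance; infer_instance

-- ===== CLAIM (what is proved, stated in full; the proofs are below) =====
def Claim_equal_chance : Prop := ∀ (ch : String), Dom_chance ch → Spec_chance ch (chance ch)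

-- ===== LEMMAS AND PROOFS =====

-- a digit char is one of the ten digit characters
lemma digit_mem (c : Char) (h : PySem.Chars.isdigit c = true) :
    c ∈ ['0', '1', '2', '3', '4', '5', '6', '7', '8', '9'] := by
  simp only [PySem.Chars.isdigit, Bool.and_eq_true, decide_eq_true_eq] at h
  obtain ⟨h1, h2⟩ := h
  rw [Char.le_def] at h1 h2
  have hv1 : 48 ≤ c.val.toNat := h1
  have hv2 : c.val.toNat ≤ 57 := h2
  have hch : ∀ d : Char, c.val.toNat = d.val.toNat → c = d := by
    intro d hd
    exact Char.ext (UInt32.toNat_inj.mp hd)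
  simp only [List.mem_cons, List.not_mem_nil, or_false]
  interval_cases hc : c.val.toNat
  · exact Or.inl (hch '0' (by decide))
  · exact Or.inr (Or.inl (hch '1' (by decide)))
  · exact Or.inr (Or.inr (Or.inl (hch '2' (by decide))))
  · exact Or.inr (Or.inr (Or.inr (Or.inl (hch '3' (by decide)))))
  · exact Or.inr (Or.inr (Or.inr (Or.inr (Or.inl (hch '4' (by decide))))))
  · exact Or.inr (Or.inr (Or.inr (Or.inr (Or.inr (Or.inl (hch '5' (by decide)))))))
  · exact Or.inr (Or.inr (Or.inr (Or.inr (Or.inr (Or.inr (Or.inl (hch '6' (by decide))))))))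
  · exact Or.inr (Or.inr (Or.inr (Or.inr (Or.inr (Or.inr (Or.inr (Or.inl (hch '7' (by decide)))))))))
  · exact Or.inr (Or.inr (Or.inr (Or.inr (Or.inr (Or.inr (Or.inr (Or.inr (Or.inl (hch '8' (by decide))))))))))
  · exact Or.inr (Or.inr (Or.inr (Or.inr (Or.inr (Or.inr (Or.inr (Or.inr (Or.inr (hch '9' (by decide))))))))))

-- int() of a single digit char lies in [0, 9]
lemma digit_bound (c : Char) (h : PySem.Chars.isdigit c = true) :
    0 ≤ (PySem.Int.ofChars? [c]).getD 0 ∧ (PySem.Int.ofChars? [c]).getD 0 ≤ 9 := by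
  have h10 := digit_mem c h
  fin_cases h10 <;> decide

-- trial division and the sieve table agree on every reachable weighted sum
set_option maxRecDepth 100000 in
lemma table_agrees : (List.range 253).all
    (fun n => premierA (n : Int) == PySem.List.pyGetD primeTableB (n : Int) false) = true := by
  decide

lemma table_agrees' (s : Int) (h0 : 0 ≤ s) (h1 : s ≤ 252) :
    premierA s = PySem.List.pyGetD primeTableB s false := by
  have h := List.all_eq_true.mp table_agrees s.toNat (List.mem_range.mpr (by omega))
  simp only [beq_iff_eq] at h
  have hs : ((s.toNat : Nat) : Int) = s := by omega
  rwa [hs] at h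

-- the weighted digit sum of an 8-char digit string lies in [0, 252]
lemma sum8_bound (l : List Char) (hlen : l.length = 8)
    (hall : l.all PySem.Chars.isdigit = true) :
    0 ≤ ((PySem.List.pyRange 0 (l.length : Int) 1).map
        (fun i => (PySem.Int.ofChars? [PySem.List.pyGetD l i ' ']).getD 0 * i)).sum ∧
      ((PySem.List.pyRange 0 (l.length : Int) 1).map
        (fun i => (PySem.Int.ofChars? [PySem.List.pyGetD l i ' ']).getD 0 * i)).sum ≤ 252 := by
  have hdig : ∀ i : Int, 0 ≤ i → i < 8 →
      0 ≤ (PySem.Int.ofChars? [PySem.List.pyGetD l i ' ']).getD 0 ∧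
        (PySem.Int.ofChars? [PySem.List.pyGetD l i ' ']).getD 0 ≤ 9 := by
    intro i hi0 hi8
    have hmem : PySem.List.pyGetD l i ' ' ∈ l :=
      PySem.List.pyGetD_mem l ' ' (by constructor <;> [omega; (rw [hlen]; omega)])
    exact digit_bound _ (List.all_eq_true.mp hall _ hmem)
  rw [hlen]
  have hr : PySem.List.pyRange 0 ((8 : Nat) : Int) 1 = [0, 1, 2, 3, 4, 5, 6, 7] := by decide
  rw [hr]
  simp only [List.map_cons, List.map_nil, List.sum_cons, List.sum_nil]
  have b0 := hdig 0 (by omega) (by omega)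
  have b1 := hdig 1 (by omega) (by omega)
  have b2 := hdig 2 (by omega) (by omega)
  have b3 := hdig 3 (by omega) (by omega)
  have b4 := hdig 4 (by omega) (by omega)
  have b5 := hdig 5 (by omega) (by omega)
  have b6 := hdig 6 (by omega) (by omega)
  have b7 := hdig 7 (by omega) (by omega)
  constructor <;> nlinarith [b0.1, b0.2, b1.1, b1.2, b2.1, b2.2, b3.1, b3.2,
    b4.1, b4.2, b5.1, b5.2, b6.1, b6.2, b7.1, b7.2]

-- ===== VERDICT (by name: the statement is the Claim_ definition above) =====
theorem chance_spec : Claim_equal_chance := by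
  intro ch _
  unfold Spec_chance chance chance_alt
  by_cases h1 : PySem.Str.strIsdigit ch = true <;>
    by_cases h2 : (PySem.Str.len ch == 8) = true <;>
      by_cases h3 : decide (PySem.List.pyGetD ch.toList 0 ' ' ∈ ['2', '4', '5', '9']) = true
  case pos =>
    -- valid phone number: both take the computing branch
    simp only [h1, h2, h3, Bool.and_self, Bool.not_true, Bool.or_self, bne, Bool.false_eq_true]
    -- identify the two digit sums
    rw [PySem.List.enumerate_eq_map_pyRange ch.toList ' ', List.map_map]
    rw [PySem.List.foldl_add _
      (fun i => (PySem.Int.ofChars? [PySem.List.pyGetD ch.toList i ' ']).getD 0 * i) 0]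
    simp only [zero_add, Function.comp_def, PySem.List.len_eq, PySem.Str.len_eq]
    have hlen : ch.toList.length = 8 := by
      have := beq_iff_eq.mp h2
      simp only [PySem.Str.len_eq] at this
      exact_mod_cast this
    have hall : ch.toList.all PySem.Chars.isdigit = true := by
      simp only [PySem.Str.strIsdigit, PySem.Chars.strIsdigit, Bool.and_eq_true] at h1
      exact h1.2
    obtain ⟨hs0, hs1⟩ := sum8_bound ch.toList hlen hall
    rw [table_agrees' _ hs0 hs1]
    rfl
  all_goals simp_all
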